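-- pv_equiv track=rewrite | github.com/cce2955/TvCGUI-Main | tdp-modules/assistdetect.py | cluster_hits
-- ===== SOURCE A (Python) =====
-- from typing import Dict, List, Tuple, Optional
--
-- DEFAULT_CLUSTER_GAP = 0x400
--
-- def cluster_hits(hits: List[int], gap: int = DEFAULT_CLUSTER_GAP) -> List[List[int]]:
--     if not hits:
--         return []
--     hits = sorted(hits)
--     clusters: List[List[int]] = [[hits[0]]]
--     for h in hits[1:]:
--         if h - clusters[-1][-1] <= gap:
--             clusters[-1].append(h)
--         else:
--             clusters.append([h])
--     return clusters
-- ===== SOURCE B (Python) =====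
-- DEFAULT_CLUSTER_GAP = 0x400
--
-- def cluster_hits(hits, gap=DEFAULT_CLUSTER_GAP):
--     s = sorted(hits)
--     if not s:
--         return []
--     # pass 1: cut indices = places where the sorted neighbours are more than gap apart
--     cuts = [i for i in range(1, len(s)) if s[i] - s[i - 1] > gap]
--     # pass 2: slice the sorted list at the boundaries
--     bounds = [0] + cuts + [len(s)]
--     return [s[a:b] for a, b in zip(bounds, bounds[1:])]
-- ===== Notes on version B (the rewrite author's own statement) =====
-- stated objective: alternative
-- what changed: Replaces A's single accumulator loop (append to the last cluster or start a new one) by a two-phase plan: first compute the list of cut indices where adjacent sorted elements differ by more than gap, then slice the sorted list at those boundaries.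
import Mathlib
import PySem

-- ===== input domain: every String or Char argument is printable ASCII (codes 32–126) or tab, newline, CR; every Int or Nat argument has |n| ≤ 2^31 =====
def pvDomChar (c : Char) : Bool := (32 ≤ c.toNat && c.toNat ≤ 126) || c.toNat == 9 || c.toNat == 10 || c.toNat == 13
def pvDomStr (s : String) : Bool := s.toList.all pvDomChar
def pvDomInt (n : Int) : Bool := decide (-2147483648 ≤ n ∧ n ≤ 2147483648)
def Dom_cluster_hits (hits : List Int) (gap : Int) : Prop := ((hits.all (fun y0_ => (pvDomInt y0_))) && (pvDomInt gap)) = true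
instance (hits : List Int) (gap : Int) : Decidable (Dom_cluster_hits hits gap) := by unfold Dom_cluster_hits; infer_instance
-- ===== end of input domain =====

-- B replaces A's accumulator loop (extend last cluster / start new one) by a two-phase plan: collect cut
-- indices where sorted neighbours differ by more than gap, then slice the sorted list at those boundaries.
-- Same O(n log n) cost, different decomposition; equivalence is about the return value (A mutates nothing the caller sees).

-- ===== PORT A =====
-- one step of A's for-loop: clusters[-1].append(h) or clusters.append([h])
def pvStepA (gap : Int) (clusters : List (List Int)) (h : Int) : List (List Int) :=
  if h - ((clusters.getLastD []).getLastD 0) ≤ gap then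
    clusters.dropLast ++ [(clusters.getLastD []) ++ [h]]
  else
    clusters ++ [[h]]

def cluster_hits (hits : List Int) (gap : Int) : List (List Int) :=
  if hits = [] then []
  else
    let s := PySem.List.sorted hits (fun x => x) false
    (PySem.List.slice s (some 1) none).foldl (pvStepA gap) [[PySem.List.pyGetD s 0 0]]

-- ===== PORT B =====
def cluster_hits_alt (hits : List Int) (gap : Int) : List (List Int) :=
  let s := PySem.List.sorted hits (fun x => x) false
  if s = [] then []
  else
    let cuts := (PySem.List.pyRange 1 (s.length : Int) 1).filter
      (fun i => decide (gap < PySem.List.pyGetD s i 0 - PySem.List.pyGetD s (i - 1) 0))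
    let bounds := 0 :: cuts ++ [(s.length : Int)]
    (bounds.zip bounds.tail).map (fun p => PySem.List.slice s (some p.1) (some p.2))

-- ===== PRECONDITION & SPEC =====
def Spec_cluster_hits (hits : List Int) (gap : Int) (out : List (List Int)) : Prop := out = cluster_hits_alt hits gap
instance (hits : List Int) (gap : Int) (out : List (List Int)) : Decidable (Spec_cluster_hits hits gap out) := by unfold Spec_cluster_hits; infer_instance

-- ===== CLAIM (what is proved, stated in full; the proofs are below) =====
def Claim_equal_cluster_hits : Prop := ∀ (hits : List Int) (gap : Int), Dom_cluster_hits hits gap → Spec_cluster_hits hits gap (cluster_hits hits gap)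

-- ===== LEMMAS AND PROOFS =====

-- bridge: the clusters of x :: xs, as direct structural recursion
def pvGrp (gap : Int) : Int → List Int → List (List Int)
  | x, [] => [[x]]
  | x, y :: ys =>
    match pvGrp gap y ys with
    | [] => [[x]]
    | g :: gs => if y - x ≤ gap then (x :: g) :: gs else [x] :: g :: gs

lemma pvGrp_shape (gap x : Int) (xs : List Int) : ∃ t gs, pvGrp gap x xs = (x :: t) :: gs := by
  cases xs with
  | nil => exact ⟨[], [], rfl⟩
  | cons y ys =>
    rcases h : pvGrp gap y ys with _ | ⟨g, gs⟩
    · exact ⟨[], [], by simp [pvGrp, h]⟩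
    · by_cases hle : y - x ≤ gap
      · exact ⟨g, gs, by simp [pvGrp, h, hle]⟩
      · exact ⟨[], g :: gs, by simp [pvGrp, h, hle]⟩

def pvGlue (c : List Int) : List (List Int) → List (List Int)
  | [] => []
  | g :: gs => (c ++ g) :: gs

-- A's fold, with current cluster c ++ [x] (so its last element is x), computes pvGrp
lemma pvA_loop (gap : Int) : ∀ (rest : List Int) (pre : List (List Int)) (c : List Int) (x : Int),
    rest.foldl (pvStepA gap) (pre ++ [c ++ [x]]) = pre ++ pvGlue c (pvGrp gap x rest) := by
  intro rest
  induction rest with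
  | nil => intro pre c x; simp [pvGrp, pvGlue]
  | cons h rest' ih =>
    intro pre c x
    obtain ⟨t, gs, hgr⟩ := pvGrp_shape gap h rest'
    by_cases hle : h - x ≤ gap
    · have hstep : pvStepA gap (pre ++ [c ++ [x]]) h = pre ++ [(c ++ [x]) ++ [h]] := by
        simp [pvStepA, hle]
      rw [List.foldl_cons, hstep, ih pre (c ++ [x]) h, hgr]
      simp [pvGrp, pvGlue, hgr, hle]
    · have hstep : pvStepA gap (pre ++ [c ++ [x]]) h = (pre ++ [c ++ [x]]) ++ [[] ++ [h]] := by
        simp [pvStepA, hle]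
      rw [List.foldl_cons, hstep, ih (pre ++ [c ++ [x]]) [] h, hgr]
      simp [pvGrp, pvGlue, hgr, hle]

-- B-side helpers (pvCuts/pvSegs spell out the two phases of B's body)
def pvCuts (gap : Int) (s : List Int) : List Int :=
  (PySem.List.pyRange 1 (s.length : Int) 1).filter
    (fun i => decide (gap < PySem.List.pyGetD s i 0 - PySem.List.pyGetD s (i - 1) 0))

def pvSegs (s : List Int) (bl : List Int) : List (List Int) :=
  (bl.zip bl.tail).map (fun p => PySem.List.slice s (some p.1) (some p.2))

lemma pvSegs_cons (s : List Int) (a b : Int) (q : List Int) :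
    pvSegs s (a :: b :: q) = PySem.List.slice s (some a) (some b) :: pvSegs s (b :: q) := by
  simp [pvSegs]

lemma pvSlice_shift (x : Int) (s' : List Int) (a b : Int) (ha : 0 ≤ a) (hb : 0 ≤ b) :
    PySem.List.slice (x :: s') (some (a + 1)) (some (b + 1)) = PySem.List.slice s' (some a) (some b) := by
  rw [PySem.List.slice_toNat _ (by omega) (by omega), PySem.List.slice_toNat _ ha hb]
  have h1 : (a + 1).toNat = a.toNat + 1 := by omega
  rw [h1]
  have h2 : (b + 1).toNat - (a.toNat + 1) = b.toNat - a.toNat := by omega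
  rw [h2, List.drop_succ_cons]

lemma pvSlice_head (x : Int) (s' : List Int) (c0 : Int) (hc : 0 ≤ c0) :
    PySem.List.slice (x :: s') (some 0) (some (c0 + 1)) =
      x :: PySem.List.slice s' (some 0) (some c0) := by
  rw [PySem.List.slice_toNat _ (by omega) (by omega), PySem.List.slice_toNat _ le_rfl hc]
  simp [show (c0 + 1).toNat = c0.toNat + 1 by omega]

lemma pvSlice_one (x : Int) (s' : List Int) :
    PySem.List.slice (x :: s') (some 0) (some 1) = [x] := by
  rw [PySem.List.slice_toNat _ le_rfl (by omega)]; rfl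

lemma pvSegs_shift (x : Int) (s' : List Int) :
    ∀ bl : List Int, (∀ i ∈ bl, 0 ≤ i) →
      pvSegs (x :: s') (bl.map (· + 1)) = pvSegs s' bl := by
  intro bl
  induction bl with
  | nil => intro _; simp [pvSegs]
  | cons a q ih =>
    cases q with
    | nil => intro _; simp [pvSegs]
    | cons b q' =>
      intro hnn
      have ha : 0 ≤ a := hnn a (by simp)
      have hb : 0 ≤ b := hnn b (by simp)
      have htail := ih (fun i hi => hnn i (List.mem_cons_of_mem _ hi))
      simp only [List.map_cons] at htail ⊢
      rw [pvSegs_cons, pvSegs_cons, pvSlice_shift x s' a b ha hb, htail]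

lemma pvRange_shift (a b : Int) :
    PySem.List.pyRange (a + 1) (b + 1) 1 = (PySem.List.pyRange a b 1).map (· + 1) := by
  rw [PySem.List.pyRange_one, PySem.List.pyRange_one, List.map_map]
  rw [show b + 1 - (a + 1) = b - a by ring]
  apply List.map_congr_left; intro k _; simp; ring

lemma pvGetD_shift (x : Int) (s' : List Int) (j : Int) (hj : 0 ≤ j) :
    PySem.List.pyGetD (x :: s') (j + 1) 0 = PySem.List.pyGetD s' j 0 := by
  rw [PySem.List.pyGetD_of_nonneg _ _ (by omega), PySem.List.pyGetD_of_nonneg _ _ hj]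
  rw [show (j + 1).toNat = j.toNat + 1 by omega, List.getD_cons_succ]

lemma pvCuts_nonneg (gap : Int) (s : List Int) : ∀ i ∈ pvCuts gap s, 0 ≤ i := by
  intro i hi
  have h1 := List.mem_filter.mp hi
  have h2 := (PySem.List.mem_pyRange_one.mp h1.1).1
  omega

lemma pvCuts_cons (gap x y : Int) (ys : List Int) :
    pvCuts gap (x :: y :: ys) =
      (if gap < y - x then [1] else []) ++ (pvCuts gap (y :: ys)).map (· + 1) := by
  unfold pvCuts
  have hlen : ((x :: y :: ys).length : Int) = ((y :: ys).length : Int) + 1 := by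
    simp [List.length_cons]
  rw [hlen]
  have hlt : (1 : Int) < ((y :: ys).length : Int) + 1 := by
    have : 1 ≤ (y :: ys).length := by simp
    omega
  rw [PySem.List.pyRange_one_cons hlt, List.filter_cons]
  have hp1 : (decide (gap < PySem.List.pyGetD (x :: y :: ys) 1 0 -
      PySem.List.pyGetD (x :: y :: ys) (1 - 1) 0)) = decide (gap < y - x) := by
    norm_num; simp [pysem]
  rw [hp1]
  have hrng : PySem.List.pyRange (1 + 1) (((y :: ys).length : Int) + 1) 1 =
      (PySem.List.pyRange 1 ((y :: ys).length : Int) 1).map (· + 1) :=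
    pvRange_shift 1 ((y :: ys).length : Int)
  rw [hrng, List.filter_map]
  have hcong : (PySem.List.pyRange 1 ((y :: ys).length : Int) 1).filter
        ((fun i => decide (gap < PySem.List.pyGetD (x :: y :: ys) i 0 -
            PySem.List.pyGetD (x :: y :: ys) (i - 1) 0)) ∘ (· + 1)) =
      (PySem.List.pyRange 1 ((y :: ys).length : Int) 1).filter
        (fun i => decide (gap < PySem.List.pyGetD (y :: ys) i 0 -
            PySem.List.pyGetD (y :: ys) (i - 1) 0)) := by
    apply List.filter_congr
    intro i hi
    have hib := PySem.List.mem_pyRange_one.mp hi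
    have h1 : PySem.List.pyGetD (x :: y :: ys) (i + 1) 0 = PySem.List.pyGetD (y :: ys) i 0 :=
      pvGetD_shift x (y :: ys) i (by omega)
    have h2 : PySem.List.pyGetD (x :: y :: ys) i 0 =
        PySem.List.pyGetD (y :: ys) (i - 1) 0 := by
      rw [show i = (i - 1) + 1 by ring]
      rw [pvGetD_shift x (y :: ys) (i - 1) (by omega)]
      rw [show i - 1 + 1 - 1 = i - 1 by ring]
    simp [Function.comp, h1, h2]
  rw [hcong]
  by_cases hgap : gap < y - x <;> simp [hgap]

lemma pvSegs_extend (x : Int) (s' : List Int) (cl : List Int) (c0 : Int) (q : List Int)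
    (hcq : cl = c0 :: q) (hnn : ∀ i ∈ cl, 0 ≤ i) :
    pvSegs (x :: s') ((0 : Int) :: cl.map (· + 1)) =
      (x :: PySem.List.slice s' (some 0) (some c0)) :: pvSegs s' (c0 :: q) := by
  subst hcq
  have hc0 : 0 ≤ c0 := hnn c0 (by simp)
  simp only [List.map_cons]
  rw [pvSegs_cons, pvSlice_head x s' c0 hc0]
  have := pvSegs_shift x s' (c0 :: q) hnn
  simp only [List.map_cons] at this
  rw [this]

lemma pvSegs_newcut (x : Int) (s' : List Int) (cl : List Int) (hnn : ∀ i ∈ cl, 0 ≤ i) :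
    pvSegs (x :: s') ((0 : Int) :: 1 :: cl.map (· + 1)) = [x] :: pvSegs s' (0 :: cl) := by
  rw [pvSegs_cons, pvSlice_one]
  have h01 : ((1 : Int) :: cl.map (· + 1)) = ((0 : Int) :: cl).map (· + 1) := by
    simp
  rw [h01, pvSegs_shift x s' (0 :: cl) (by intro i hi; rcases List.mem_cons.mp hi with h | h
                                           · omega
                                           · exact hnn i h)]

lemma pvB_core (gap : Int) : ∀ (rest : List Int) (x : Int),
    pvSegs (x :: rest) ((0 : Int) :: pvCuts gap (x :: rest) ++ [((x :: rest).length : Int)]) =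
      pvGrp gap x rest := by
  intro rest
  induction rest with
  | nil =>
    intro x
    have hcuts : pvCuts gap [x] = [] := by
      unfold pvCuts
      rw [PySem.List.pyRange_one_eq_nil (by simp)]
      rfl
    rw [hcuts]
    have h1 : (([x] : List Int).length : Int) = 1 := by simp
    rw [h1]
    simp only [List.nil_append, List.cons_append]
    rw [pvSegs_cons, pvSlice_one]
    simp [pvSegs, pvGrp]
  | cons y ys ih =>
    intro x
    rw [pvCuts_cons]
    have hlen : ((x :: y :: ys).length : Int) = ((y :: ys).length : Int) + 1 := by
      simp [List.length_cons]
    rw [hlen]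
    obtain ⟨c0, q, hcq⟩ : ∃ c0 q,
        pvCuts gap (y :: ys) ++ [((y :: ys).length : Int)] = c0 :: q := by
      cases h : pvCuts gap (y :: ys) with
      | nil => exact ⟨((y :: ys).length : Int), [], by simp⟩
      | cons a t => exact ⟨a, t ++ [((y :: ys).length : Int)], by simp⟩
    have hnn : ∀ i ∈ pvCuts gap (y :: ys) ++ [((y :: ys).length : Int)], 0 ≤ i := by
      intro i hi
      rcases List.mem_append.mp hi with h | h
      · exact pvCuts_nonneg gap (y :: ys) i h
      · simp at h; subst h; positivity
    have hIH := ih y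
    obtain ⟨t, gs, hgr⟩ := pvGrp_shape gap y ys
    by_cases hgap : gap < y - x
    · simp only [if_pos hgap]
      have hbl : (([1] ++ (pvCuts gap (y :: ys)).map (· + 1)) ++ [((y :: ys).length : Int) + 1])
          = (1 : Int) :: (pvCuts gap (y :: ys) ++ [((y :: ys).length : Int)]).map (· + 1) := by
        simp
      rw [show ((0 : Int) :: ([1] ++ (pvCuts gap (y :: ys)).map (· + 1)) ++ [((y :: ys).length : Int) + 1])
            = (0 : Int) :: (([1] ++ (pvCuts gap (y :: ys)).map (· + 1)) ++ [((y :: ys).length : Int) + 1]) by simp, hbl]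
      rw [pvSegs_newcut x (y :: ys) _ hnn]
      have hIH' : pvSegs (y :: ys) ((0 : Int) :: pvCuts gap (y :: ys) ++ [((y :: ys).length : Int)])
          = pvGrp gap y ys := hIH
      rw [show ((0 : Int) :: pvCuts gap (y :: ys) ++ [((y :: ys).length : Int)])
            = (0 : Int) :: (pvCuts gap (y :: ys) ++ [((y :: ys).length : Int)]) by simp] at hIH'
      rw [hIH', hgr]
      simp [pvGrp, hgr, show ¬ (y - x ≤ gap) by omega]
    · simp only [if_neg hgap]
      have hbl : (((pvCuts gap (y :: ys)).map (· + 1)) ++ [((y :: ys).length : Int) + 1])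
          = (pvCuts gap (y :: ys) ++ [((y :: ys).length : Int)]).map (· + 1) := by
        simp
      rw [show ((0 : Int) :: (List.nil ++ (pvCuts gap (y :: ys)).map (· + 1)) ++ [((y :: ys).length : Int) + 1])
            = (0 : Int) :: (((pvCuts gap (y :: ys)).map (· + 1)) ++ [((y :: ys).length : Int) + 1]) by simp, hbl]
      rw [pvSegs_extend x (y :: ys) _ c0 q hcq hnn]
      have hIH' : pvSegs (y :: ys) ((0 : Int) :: c0 :: q) = pvGrp gap y ys := by
        rw [← hcq]
        rw [show ((0 : Int) :: (pvCuts gap (y :: ys) ++ [((y :: ys).length : Int)]))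
              = (0 : Int) :: pvCuts gap (y :: ys) ++ [((y :: ys).length : Int)] by simp]
        exact hIH
      rw [pvSegs_cons] at hIH'
      rw [hgr] at hIH'
      have hg1 : PySem.List.slice (y :: ys) (some 0) (some c0) = y :: t :=
        (List.cons.injEq _ _ _ _).mp hIH' |>.1
      have hg2 : pvSegs (y :: ys) (c0 :: q) = gs :=
        (List.cons.injEq _ _ _ _).mp hIH' |>.2
      rw [hg1, hg2]
      simp [pvGrp, hgr, show y - x ≤ gap by omega]

theorem cluster_hits_spec : Claim_equal_cluster_hits := by
  intro hits gap _
  unfold Spec_cluster_hits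
  by_cases hh : hits = []
  · subst hh
    simp [cluster_hits, cluster_hits_alt, PySem.List.sorted_eq_nil_iff]
  · have hs : PySem.List.sorted hits (fun x => x) false ≠ [] := by
      rw [Ne, PySem.List.sorted_eq_nil_iff]; exact hh
    rcases hsrt : PySem.List.sorted hits (fun x => x) false with _ | ⟨h0, rest⟩
    · exact absurd hsrt hs
    -- A side
    have hA : cluster_hits hits gap = pvGrp gap h0 rest := by
      unfold cluster_hits
      rw [if_neg hh]
      simp only [hsrt, PySem.List.slice_from_one, List.tail_cons]
      have h0v : PySem.List.pyGetD (h0 :: rest) 0 0 = h0 := by simp [pysem]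
      rw [h0v]
      have := pvA_loop gap rest [] [] h0
      simp only [List.nil_append] at this
      rw [this]
      obtain ⟨t, gs, hgr⟩ := pvGrp_shape gap h0 rest
      rw [hgr]
      simp [pvGlue]
    -- B side
    have hB : cluster_hits_alt hits gap = pvGrp gap h0 rest := by
      unfold cluster_hits_alt
      simp only [hsrt]
      rw [if_neg (by simp)]
      have := pvB_core gap rest h0
      unfold pvSegs pvCuts at this
      simpa using this
    rw [hA, hB]
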